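-- pv_equiv track=rewrite | github.com/ShawnHan1993/EC602 | hw13/w13_wordbrain.py | buildConnection
-- ===== SOURCE A (Python) =====
-- def buildConnection(strMaze, n):
--     connection = [0] * (n ** 2)
--     for i in range(n ** 2):
--         connection[i] = [False] * (n ** 2)
--     for i in range(len(strMaze)):
--         if strMaze[i] == '0':
--             continue
--         col = i // n
--         row = i % n
--         if row != 0:
--             connection[i][i - 1] = True and strMaze[i - 1] != '0'
--             if col != 0:
--                 connection[i][i - n - 1] = True  and strMaze[i - n - 1] != '0'
--             if col != n - 1:
--                 connection[i][i + n - 1] = True and strMaze[i + n - 1] != '0'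
--         if row != n - 1:
--             connection[i][i + 1] = True and strMaze[i + 1] != '0'
--             if col != 0:
--                 connection[i][i - n + 1] = True and strMaze[i - n + 1] != '0'
--             if col != n - 1:
--                 connection[i][i + n + 1] = True and strMaze[i + n + 1] != '0'
--         if col != 0:
--             connection[i][i - n] = True and strMaze[i - n] != '0'
--         if col != n - 1:
--             connection[i][i + n] = True and strMaze[i + n] != '0'
--     return connection
-- ===== SOURCE B (Python) =====
-- def buildConnection(strMaze, n):
--     size = n * n
--
--     def alive(k):
--         return 0 <= k < len(strMaze) and strMaze[k] != '0'
--
--     def adjacent(i, j):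
--         return (i != j
--                 and abs(i // n - j // n) <= 1
--                 and abs(i % n - j % n) <= 1)
--
--     rows = []
--     for i in range(size):
--         if alive(i):
--             # outside the contiguous band [lo, hi) the adjacency predicate is False anyway
--             lo = max(0, i // n - 1) * n
--             hi = min(n, i // n + 2) * n
--             rows.append([False] * lo
--                         + [adjacent(i, j) and alive(j) for j in range(lo, hi)]
--                         + [False] * (size - hi))
--         else:
--             rows.append([False] * size)
--     return rows
-- ===== Notes on version B (the rewrite author's own statement) =====
-- stated objective: simpler
-- what changed: A allocates a matrix and mutates it with eight boundary-guarded neighbor writes per live cell; B never enumerates neighbors at all: it builds the matrix as a pure pairwise comprehension, computing each entry directly from a closed-form Chebyshev-distance adjacency predicate on (i,j).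
-- outside the precondition, e.g. on buildConnection('a0', 1): A returns [[False]], B returns [[False]]
import Mathlib
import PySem

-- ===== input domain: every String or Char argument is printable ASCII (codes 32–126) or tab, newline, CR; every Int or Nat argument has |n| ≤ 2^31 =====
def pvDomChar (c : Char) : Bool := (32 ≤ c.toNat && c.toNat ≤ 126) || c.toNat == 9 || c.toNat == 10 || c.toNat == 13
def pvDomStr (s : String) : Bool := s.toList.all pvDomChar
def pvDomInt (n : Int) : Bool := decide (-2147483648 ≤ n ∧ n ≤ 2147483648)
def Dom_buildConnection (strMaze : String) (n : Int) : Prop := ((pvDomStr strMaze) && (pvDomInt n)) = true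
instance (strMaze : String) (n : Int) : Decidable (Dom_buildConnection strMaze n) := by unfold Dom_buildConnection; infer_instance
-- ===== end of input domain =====

-- B replaces A's mutation + per-live-cell neighbor writes by a pure pairwise comprehension from a closed-form adjacency predicate; equivalence is about the return value only (A mutates only its own fresh list).

-- ===== PORT A =====
-- strMaze[k] as a Char; inside Pre_ every executed read is in range (Python raises on the none case)
def pvGetA (s : String) (k : Int) : Char := (PySem.Str.pyGet? s k).getD '0'

-- row[j] = v  (Python list assignment; negative j wraps, out of range raises — unreachable inside Pre_)
def pvSetRow (l : List Bool) (j : Int) (v : Bool) : List Bool :=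
  let jj := if j < 0 then j + l.length else j
  if 0 ≤ jj ∧ jj < (l.length : Int) then l.set jj.toNat v else l

-- connection[i][j] = v
def pvSet2 (conn : List (List Bool)) (i j : Int) (v : Bool) : List (List Bool) :=
  let ii := if i < 0 then i + conn.length else i
  if 0 ≤ ii ∧ ii < (conn.length : Int) then
    conn.set ii.toNat (pvSetRow (conn.getD ii.toNat []) j v)
  else conn

-- one iteration of A's main loop (body for index i)
def pvStepA (s : String) (n : Int) (conn : List (List Bool)) (i : Int) : List (List Bool) :=
  if pvGetA s i = '0' then conn
  else
    let col := PySem.Int.floordiv i n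
    let row := PySem.Int.mod i n
    let c1 :=
      if row ≠ 0 then
        let a := pvSet2 conn i (i - 1) (pvGetA s (i - 1) ≠ '0')
        let a := if col ≠ 0 then pvSet2 a i (i - n - 1) (pvGetA s (i - n - 1) ≠ '0') else a
        if col ≠ n - 1 then pvSet2 a i (i + n - 1) (pvGetA s (i + n - 1) ≠ '0') else a
      else conn
    let c2 :=
      if row ≠ n - 1 then
        let a := pvSet2 c1 i (i + 1) (pvGetA s (i + 1) ≠ '0')
        let a := if col ≠ 0 then pvSet2 a i (i - n + 1) (pvGetA s (i - n + 1) ≠ '0') else a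
        if col ≠ n - 1 then pvSet2 a i (i + n + 1) (pvGetA s (i + n + 1) ≠ '0') else a
      else c1
    let c3 := if col ≠ 0 then pvSet2 c2 i (i - n) (pvGetA s (i - n) ≠ '0') else c2
    if col ≠ n - 1 then pvSet2 c3 i (i + n) (pvGetA s (i + n) ≠ '0') else c3

def buildConnection (strMaze : String) (n : Int) : List (List Bool) :=
  -- connection = [0]*(n**2); for i in range(n**2): connection[i] = [False]*(n**2)
  let sz := (n ^ 2).toNat
  let init : List (List Bool) := List.replicate sz (List.replicate sz false)
  (PySem.List.pyRange 0 (PySem.Str.len strMaze) 1).foldl (pvStepA strMaze n) init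

-- ===== PORT B =====
-- alive(k) = 0 <= k < len(strMaze) and strMaze[k] != '0'
def pvAliveB (s : String) (k : Int) : Bool :=
  decide (0 ≤ k) && decide (k < PySem.Str.len s) && decide (((PySem.Str.pyGet? s k).getD '0') ≠ '0')

-- adjacent(i, j): distinct cells within Chebyshev distance 1 (closed form via // and %)
def pvAdjB (n i j : Int) : Bool :=
  decide (i ≠ j) &&
  decide (|PySem.Int.floordiv i n - PySem.Int.floordiv j n| ≤ 1) &&
  decide (|PySem.Int.mod i n - PySem.Int.mod j n| ≤ 1)

-- one row: padded with False outside the contiguous band [lo, hi), band entries from the predicate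
def pvRowB (s : String) (n size i : Int) : List Bool :=
  if pvAliveB s i then
    let lo := (max 0 (PySem.Int.floordiv i n - 1)) * n
    let hi := (min n (PySem.Int.floordiv i n + 2)) * n
    List.replicate lo.toNat false
      ++ (PySem.List.pyRange lo hi 1).map (fun j => pvAdjB n i j && pvAliveB s j)
      ++ List.replicate (size - hi).toNat false
  else List.replicate size.toNat false

def buildConnection_alt (strMaze : String) (n : Int) : List (List Bool) :=
  let size := n * n
  (PySem.List.pyRange 0 size 1).foldl (fun rows i => rows ++ [pvRowB strMaze n size i]) []

-- ===== PRECONDITION & SPEC =====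
-- Pre_ admits exact n×n grids (len = n², n ≥ 0) and strings with no live cell (all '0', any n),
-- where A's iteration is total; other inputs are excluded: there A usually raises IndexError /
-- ZeroDivisionError, and where it does return, that value is an accident of partially iterating a
-- string that is not an n×n grid. See claim.json "cites" for concrete excluded examples.
def Pre_buildConnection (strMaze : String) (n : Int) : Prop :=
  ((strMaze.toList.length : Int) = n * n ∧ 0 ≤ n) ∨ (∀ c ∈ strMaze.toList, c = '0')
instance (strMaze : String) (n : Int) : Decidable (Pre_buildConnection strMaze n) := by
  unfold Pre_buildConnection; infer_instance

def pvWitness_buildConnection : String × Int := ("a00b", 2)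

def Spec_buildConnection (strMaze : String) (n : Int) (out : List (List Bool)) : Prop := out = buildConnection_alt strMaze n
instance (strMaze : String) (n : Int) (out : List (List Bool)) : Decidable (Spec_buildConnection strMaze n out) := by unfold Spec_buildConnection; infer_instance

-- ===== CLAIM (what is proved, stated in full; the proofs are below) =====
def Claim_equal_buildConnection : Prop := ∀ (strMaze : String) (n : Int), Dom_buildConnection strMaze n → Pre_buildConnection strMaze n → Spec_buildConnection strMaze n (buildConnection strMaze n)

-- ===== LEMMAS AND PROOFS =====

-- entry accessor used throughout the proof
def pvE (conn : List (List Bool)) (k j : Nat) : Bool := (conn.getD k []).getD j false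

-- the set of column indices A writes in row i, in A's order
def pvWrites (n i : Int) : List Int :=
  let col := PySem.Int.floordiv i n
  let row := PySem.Int.mod i n
  ((if row ≠ 0 then
      [i - 1] ++ (if col ≠ 0 then [i - n - 1] else []) ++ (if col ≠ n - 1 then [i + n - 1] else [])
    else []) ++
   (if row ≠ n - 1 then
      [i + 1] ++ (if col ≠ 0 then [i - n + 1] else []) ++ (if col ≠ n - 1 then [i + n + 1] else [])
    else []) ++
   (if col ≠ 0 then [i - n] else []) ++
   (if col ≠ n - 1 then [i + n] else []))

def pvApply (s : String) (conn : List (List Bool)) (i : Int) (js : List Int) : List (List Bool) :=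
  js.foldl (fun c j => pvSet2 c i j (pvGetA s j ≠ '0')) conn

theorem pvSetRow_length (l : List Bool) (j : Int) (v : Bool) :
    (pvSetRow l j v).length = l.length := by
  unfold pvSetRow; split <;> dsimp only <;> split <;> simp

theorem pvStepA_eq (s : String) (n : Int) (conn : List (List Bool)) (i : Int) :
    pvStepA s n conn i =
      if pvGetA s i = '0' then conn else pvApply s conn i (pvWrites n i) := by
  unfold pvStepA pvWrites pvApply
  by_cases h0 : pvGetA s i = '0'
  · simp [h0]
  · by_cases h1 : PySem.Int.mod i n ≠ 0 <;>
    by_cases h2 : PySem.Int.floordiv i n ≠ 0 <;>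
    by_cases h3 : PySem.Int.floordiv i n ≠ n - 1 <;>
    by_cases h4 : PySem.Int.mod i n ≠ n - 1 <;>
    simp [h0, h1, h2, h3, h4]

-- lengths
theorem pvSet2_length (conn : List (List Bool)) (i j : Int) (v : Bool) :
    (pvSet2 conn i j v).length = conn.length := by
  unfold pvSet2; split <;> dsimp only <;> split <;> simp

theorem pvApply_length (s : String) (conn : List (List Bool)) (i : Int) (js : List Int) :
    (pvApply s conn i js).length = conn.length := by
  induction js generalizing conn with
  | nil => rfl
  | cons j js ih => simp [pvApply] at ih ⊢; rw [ih, pvSet2_length]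

-- entry of a single assignment
theorem pvE_pvSet2 (conn : List (List Bool)) (i j : Int) (v : Bool) (k j' : Nat)
    (hi : 0 ≤ i) (hi2 : i < (conn.length : Int))
    (hj : 0 ≤ j) (hj2 : j < ((conn.getD i.toNat []).length : Int)) :
    pvE (pvSet2 conn i j v) k j' =
      if k = i.toNat ∧ j' = j.toNat then v else pvE conn k j' := by
  have h1 : ¬ i < 0 := by omega
  have h2 : ¬ j < 0 := by omega
  have hrl : j.toNat < (conn.getD i.toNat []).length := by omega
  have hil : i.toNat < conn.length := by omega
  have hj2' : j < (conn[i.toNat].length : Int) := by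
    rwa [List.getD_eq_getElem _ _ hil] at hj2
  have hset : pvSet2 conn i j v = conn.set i.toNat ((conn.getD i.toNat []).set j.toNat v) := by
    simp [pvSet2, pvSetRow, h1, h2, hi, hi2, hj, hj2']
  rw [hset]; unfold pvE
  have hgd : (conn.set i.toNat ((conn.getD i.toNat []).set j.toNat v)).getD i.toNat [] =
      (conn.getD i.toNat []).set j.toNat v := by
    rw [List.getD_eq_getElem _ _ (by simpa using hil)]
    exact List.getElem_set_self _
  by_cases hk : k = i.toNat
  · subst hk
    rw [hgd]
    by_cases hj' : j' = j.toNat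
    · subst hj'
      rw [List.getD_eq_getElem _ _ (by simpa using hrl)]
      simp [List.getElem_set_self]
    · rw [if_neg (by tauto)]
      simp only [List.getD, List.getElem?_set]
      simp [Ne.symm hj']
  · rw [if_neg (by tauto)]
    simp only [List.getD, List.getElem?_set]
    simp [Ne.symm hk]

theorem pvGetDset_len (conn : List (List Bool)) (m : Nat) (row : List Bool) (k : Nat)
    (hrow : row.length = (conn.getD m []).length) :
    ((conn.set m row).getD k []).length = (conn.getD k []).length := by
  simp only [List.getD, List.getElem?_set]
  by_cases he : m = k
  · subst he
    by_cases hlt : m < conn.length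
    · simpa [hlt, List.getElem?_eq_getElem hlt] using hrow
    · have h1 : conn[m]? = none := by
        rw [List.getElem?_eq_none_iff]; omega
      simp [hlt]
  · simp [he]

theorem pvSet2_rowlen (conn : List (List Bool)) (i j : Int) (v : Bool) (k : Nat) :
    ((pvSet2 conn i j v).getD k []).length = (conn.getD k []).length := by
  unfold pvSet2
  split <;> dsimp only <;> split
  · exact pvGetDset_len _ _ _ _ (pvSetRow_length _ _ _)
  · rfl
  · exact pvGetDset_len _ _ _ _ (pvSetRow_length _ _ _)
  · rfl

-- entry after a chain of in-range assignments in row i, each writing aliveness of its column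
theorem pvE_pvApply (s : String) (conn : List (List Bool)) (i : Int) (js : List Int) (k j' : Nat)
    (hi : 0 ≤ i) (hi2 : i < (conn.length : Int))
    (hjs : ∀ j ∈ js, 0 ≤ j ∧ j < ((conn.getD i.toNat []).length : Int)) :
    pvE (pvApply s conn i js) k j' =
      if k = i.toNat ∧ (∃ j ∈ js, j.toNat = j') then decide (pvGetA s (j' : Int) ≠ '0') else pvE conn k j' := by
  induction js generalizing conn with
  | nil => simp [pvApply]
  | cons j js ih =>
    obtain ⟨hj0, hjlt⟩ := hjs j (by simp)
    have hstep : pvApply s conn i (j :: js) =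
        pvApply s (pvSet2 conn i j (decide (pvGetA s j ≠ '0'))) i js := rfl
    rw [hstep, ih _ (by rw [pvSet2_length]; exact hi2)
      (fun jj hjj => by rw [pvSet2_rowlen]; exact hjs jj (by simp [hjj])),
      pvE_pvSet2 conn i j _ k j' hi hi2 hj0 hjlt]
    by_cases hk : k = i.toNat
    · subst hk
      by_cases hex : ∃ jj ∈ js, jj.toNat = j'
      · simp [hex]
      · by_cases hjj : j' = j.toNat
        · have hje : (j' : Int) = j := by omega
          subst hjj
          simp [hex, hje]
        · simp [hex, hjj, Ne.symm hjj]
    · simp [hk]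

-- membership in the write list ↔ in range and the closed-form adjacency predicate holds
set_option maxHeartbeats 1000000 in
theorem pvWrites_char (n i j : Int) (hn : 1 ≤ n) (hi : 0 ≤ i) (hi2 : i < n * n) :
    j ∈ pvWrites n i ↔ (0 ≤ j ∧ j < n * n ∧ pvAdjB n i j = true) := by
  have hnpos : (0 : Int) < n := by omega
  set q := PySem.Int.floordiv i n with hqdef
  set r := PySem.Int.mod i n with hrdef
  have hmemiff : j ∈ pvWrites n i ↔
      ((r ≠ 0 ∧ j = i - 1) ∨ (r ≠ 0 ∧ q ≠ 0 ∧ j = i - n - 1) ∨ (r ≠ 0 ∧ q ≠ n - 1 ∧ j = i + n - 1) ∨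
       (r ≠ n - 1 ∧ j = i + 1) ∨ (r ≠ n - 1 ∧ q ≠ 0 ∧ j = i - n + 1) ∨ (r ≠ n - 1 ∧ q ≠ n - 1 ∧ j = i + n + 1) ∨
       (q ≠ 0 ∧ j = i - n) ∨ (q ≠ n - 1 ∧ j = i + n)) := by
    by_cases g1 : r = 0 <;> by_cases g2 : q = 0 <;> by_cases g3 : q = n - 1 <;> by_cases g4 : r = n - 1 <;>
      simp [pvWrites, ← hqdef, ← hrdef, g1, g2, g3, g4] <;> tauto
  have hqr : q * n + r = i := PySem.Int.floordiv_mul_add_mod i n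
  have hr0 : 0 ≤ r := by rw [hrdef, PySem.Int.mod_eq_emod_of_pos hnpos]; exact Int.emod_nonneg i (by omega)
  have hrn : r < n := by rw [hrdef, PySem.Int.mod_eq_emod_of_pos hnpos]; exact Int.emod_lt_of_pos i hnpos
  have hq0 : 0 ≤ q := by
    rw [hqdef]; rw [PySem.Int.le_floordiv_iff_mul_le hnpos]; nlinarith
  have hqn : q < n := by
    rw [hqdef]; rw [PySem.Int.floordiv_lt_iff_lt_mul hnpos]; exact hi2
  have key : ∀ dq dr : Int, 0 ≤ r + dr → r + dr < n → j = i + dq * n + dr →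
      PySem.Int.floordiv j n = q + dq ∧ PySem.Int.mod j n = r + dr := by
    intro dq dr h1 h2 h3
    have hfd : PySem.Int.floordiv j n = q + dq := by
      rw [PySem.Int.floordiv_eq_iff_of_pos hnpos]
      constructor <;> nlinarith [hqr]
    refine ⟨hfd, ?_⟩
    have hb := PySem.Int.floordiv_mul_add_mod j n
    rw [hfd] at hb
    nlinarith [hqr]
  have main : ∀ dq dr : Int, -1 ≤ dq → dq ≤ 1 → -1 ≤ dr → dr ≤ 1 → ¬(dq = 0 ∧ dr = 0) →
      0 ≤ q + dq → q + dq < n → 0 ≤ r + dr → r + dr < n → j = i + dq * n + dr →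
      0 ≤ j ∧ j < n * n ∧ pvAdjB n i j = true := by
    intro dq dr h1 h2 h3 h4 h5 hq1 hq2 hr1 hr2 hjeq
    obtain ⟨hqj, hrj⟩ := key dq dr (by omega) (by omega) hjeq
    have hb := PySem.Int.floordiv_mul_add_mod j n
    rw [hqj, hrj] at hb
    have hj0 : 0 ≤ j := by nlinarith [mul_nonneg hq1 (le_of_lt hnpos)]
    have hjn : j < n * n := by
      nlinarith [mul_le_mul_of_nonneg_right (show q + dq ≤ n - 1 by omega) (le_of_lt hnpos)]
    have hne : i ≠ j := by
      intro he
      interval_cases dq <;> interval_cases dr <;> omega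
    refine ⟨hj0, hjn, ?_⟩
    simp only [pvAdjB, ← hqdef, ← hrdef, hqj, hrj, Bool.and_eq_true, decide_eq_true_eq]
    refine ⟨⟨hne, ?_⟩, ?_⟩ <;> rw [abs_le] <;> omega
  constructor
  · intro hmem
    rw [hmemiff] at hmem
    rcases hmem with ⟨hg, hjeq⟩ | ⟨hg1, hg2, hjeq⟩ | ⟨hg1, hg2, hjeq⟩ | ⟨hg, hjeq⟩ |
      ⟨hg1, hg2, hjeq⟩ | ⟨hg1, hg2, hjeq⟩ | ⟨hg, hjeq⟩ | ⟨hg, hjeq⟩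
    · exact main 0 (-1) (by omega) (by omega) (by omega) (by omega) (by omega) (by omega) (by omega) (by omega) (by omega) (by omega)
    · exact main (-1) (-1) (by omega) (by omega) (by omega) (by omega) (by omega) (by omega) (by omega) (by omega) (by omega) (by omega)
    · exact main 1 (-1) (by omega) (by omega) (by omega) (by omega) (by omega) (by omega) (by omega) (by omega) (by omega) (by omega)
    · exact main 0 1 (by omega) (by omega) (by omega) (by omega) (by omega) (by omega) (by omega) (by omega) (by omega) (by omega)
    · exact main (-1) 1 (by omega) (by omega) (by omega) (by omega) (by omega) (by omega) (by omega) (by omega) (by omega) (by omega)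
    · exact main 1 1 (by omega) (by omega) (by omega) (by omega) (by omega) (by omega) (by omega) (by omega) (by omega) (by omega)
    · exact main (-1) 0 (by omega) (by omega) (by omega) (by omega) (by omega) (by omega) (by omega) (by omega) (by omega) (by omega)
    · exact main 1 0 (by omega) (by omega) (by omega) (by omega) (by omega) (by omega) (by omega) (by omega) (by omega) (by omega)
  · rintro ⟨hj0, hjn2, hadj⟩
    set qj := PySem.Int.floordiv j n with hqjdef
    set rj := PySem.Int.mod j n with hrjdef
    have hqrj : qj * n + rj = j := PySem.Int.floordiv_mul_add_mod j n
    have hrj0 : 0 ≤ rj := by rw [hrjdef, PySem.Int.mod_eq_emod_of_pos hnpos]; exact Int.emod_nonneg j (by omega)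
    have hrjn : rj < n := by rw [hrjdef, PySem.Int.mod_eq_emod_of_pos hnpos]; exact Int.emod_lt_of_pos j hnpos
    have hqj0 : 0 ≤ qj := by
      rw [hqjdef]; rw [PySem.Int.le_floordiv_iff_mul_le hnpos]; nlinarith
    have hqjn : qj < n := by
      rw [hqjdef]; rw [PySem.Int.floordiv_lt_iff_lt_mul hnpos]; exact hjn2
    simp only [pvAdjB, ← hqdef, ← hrdef, ← hqjdef, ← hrjdef, Bool.and_eq_true,
      decide_eq_true_eq, abs_le] at hadj
    obtain ⟨⟨hne, hdq1, hdq2⟩, hdr1, hdr2⟩ := hadj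
    rw [hmemiff]
    have hacase : qj = q - 1 ∨ qj = q ∨ qj = q + 1 := by omega
    have hbcase : rj = r - 1 ∨ rj = r ∨ rj = r + 1 := by omega
    rcases hacase with ha | ha | ha <;> rcases hbcase with hb | hb | hb <;>
      rw [ha, hb] at hqrj <;> ring_nf at hqrj hqr <;>
      [skip; skip; skip; skip; skip; skip; skip; skip; skip]
    · exact Or.inr (Or.inl ⟨by omega, by omega, by linarith⟩)
    · exact Or.inr (Or.inr (Or.inr (Or.inr (Or.inr (Or.inr (Or.inl ⟨by omega, by linarith⟩))))))
    · exact Or.inr (Or.inr (Or.inr (Or.inr (Or.inl ⟨by omega, by omega, by linarith⟩))))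
    · exact Or.inl ⟨by omega, by linarith⟩
    · exact absurd (by linarith : i = j) hne
    · exact Or.inr (Or.inr (Or.inr (Or.inl ⟨by omega, by linarith⟩)))
    · exact Or.inr (Or.inr (Or.inl ⟨by omega, by omega, by linarith⟩))
    · exact Or.inr (Or.inr (Or.inr (Or.inr (Or.inr (Or.inr (Or.inr ⟨by omega, by linarith⟩))))))
    · exact Or.inr (Or.inr (Or.inr (Or.inr (Or.inr (Or.inl ⟨by omega, by omega, by linarith⟩)))))

theorem pvApply_rowlen (s : String) (conn : List (List Bool)) (i : Int) (js : List Int) (k : Nat) :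
    ((pvApply s conn i js).getD k []).length = (conn.getD k []).length := by
  induction js generalizing conn with
  | nil => rfl
  | cons j js ih =>
    have hstep : pvApply s conn i (j :: js) =
        pvApply s (pvSet2 conn i j (decide (pvGetA s j ≠ '0'))) i js := rfl
    rw [hstep, ih, pvSet2_rowlen]

theorem pvAliveB_of_lt (s : String) (t : Int) (h0 : 0 ≤ t) (hlt : t < (s.toList.length : Int)) :
    pvAliveB s t = decide (pvGetA s t ≠ '0') := by
  have h1 : decide (t < PySem.Str.len s) = true := by
    rw [PySem.Str.len_eq]; exact decide_eq_true hlt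
  unfold pvAliveB pvGetA
  rw [h1, decide_eq_true h0]
  simp

theorem pvAliveB_false (s : String) (t : Int) (h : pvGetA s t = '0') : pvAliveB s t = false := by
  unfold pvGetA at h
  have h' : (PySem.List.pyGet? s.toList t).getD '0' = '0' := h
  unfold pvAliveB
  simp [h']

theorem pvFold_inv (s : String) (n : Int) (hn : 1 ≤ n) (hlen : ((s.toList.length : Nat) : Int) = n * n) (m : Nat) (hm : (m : Int) ≤ n * n) :
    ((PySem.List.pyRange 0 (m : Int) 1).foldl (pvStepA s n)
        (List.replicate (n*n).toNat (List.replicate (n*n).toNat false))).length = (n*n).toNat ∧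
    (∀ k : Nat, k < (n*n).toNat → (((PySem.List.pyRange 0 (m : Int) 1).foldl (pvStepA s n)
        (List.replicate (n*n).toNat (List.replicate (n*n).toNat false))).getD k []).length
        = (n*n).toNat) ∧
    (∀ k j' : Nat, k < (n*n).toNat → j' < (n*n).toNat →
      pvE ((PySem.List.pyRange 0 (m : Int) 1).foldl (pvStepA s n)
        (List.replicate (n*n).toNat (List.replicate (n*n).toNat false))) k j' =
        if (k : Int) < (m : Int) then
          (pvAliveB s (k : Int) && (pvAdjB n (k : Int) (j' : Int) && pvAliveB s (j' : Int)))
        else false) := by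
  have hsz : (((n*n).toNat : Int)) = n * n := Int.toNat_of_nonneg (by nlinarith)
  induction m with
  | zero =>
    rw [PySem.List.pyRange_one_eq_nil (by omega)]
    refine ⟨by simp, ?_, ?_⟩
    · intro k hk
      simp only [List.foldl_nil]
      rw [List.getD_eq_getElem _ _ (by simpa using hk)]
      simp
    · intro k j' hk hj'
      have hneg : ¬ ((k : Int) < ((0:Nat) : Int)) := by omega
      have h1 : (List.replicate (n*n).toNat (List.replicate (n*n).toNat false)).getD k [] =
          List.replicate (n*n).toNat false := by
        rw [List.getD_eq_getElem _ _ (by simpa using hk)]; simp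
      simp only [List.foldl_nil, pvE, hneg, if_false, h1]
      simp [List.getD_eq_getElem?_getD, List.getElem?_replicate]
      split <;> rfl
  | succ m ih =>
    have hm' : (m : Int) ≤ n * n := by push_cast at hm ⊢; omega
    obtain ⟨ihL, ihRow, ihE⟩ := ih hm'
    have hcast : ((m + 1 : Nat) : Int) = (m : Int) + 1 := by push_cast; ring
    rw [hcast, PySem.List.pyRange_one_succ_right (by positivity), List.foldl_append]
    simp only [List.foldl_cons, List.foldl_nil]
    rw [pvStepA_eq]
    have hmlt : (m : Int) < n * n := by omega
    have hmsz : m < (n*n).toNat := by omega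
    by_cases h0 : pvGetA s (m : Int) = '0'
    · rw [if_pos h0]
      refine ⟨ihL, ihRow, ?_⟩
      intro k j' hk hj'
      rw [ihE k j' hk hj']
      by_cases hkm : (k : Int) < (m : Int)
      · simp [hkm, show (k:Int) < (m:Int) + 1 by omega]
      · by_cases hkm1 : (k : Int) < (m : Int) + 1
        · have hke : k = m := by omega
          subst hke
          simp [hkm1, pvAliveB_false _ _ h0]
        · simp [hkm, hkm1]
    · rw [if_neg h0]
      have halive : pvAliveB s (m : Int) = true := by
        rw [pvAliveB_of_lt s _ (by omega) (by omega)]; simp [h0]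
      have hiL : (m : Int) < (((PySem.List.pyRange 0 (m : Int) 1).foldl (pvStepA s n)
          (List.replicate (n*n).toNat (List.replicate (n*n).toNat false))).length : Int) := by
        rw [ihL, hsz]; omega
      have hjs : ∀ j ∈ pvWrites n (m : Int), 0 ≤ j ∧
          j < ((((PySem.List.pyRange 0 (m : Int) 1).foldl (pvStepA s n)
            (List.replicate (n*n).toNat (List.replicate (n*n).toNat false))).getD (m : Int).toNat []).length : Int) := by
        intro j hj
        obtain ⟨hj0, hjn, _⟩ := (pvWrites_char n (m : Int) j hn (by omega) hmlt).mp hj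
        refine ⟨hj0, ?_⟩
        rw [Int.toNat_natCast, ihRow m hmsz, hsz]
        exact hjn
      refine ⟨by rw [pvApply_length]; exact ihL, ?_, ?_⟩
      · intro k hk
        rw [pvApply_rowlen]; exact ihRow k hk
      · intro k j' hk hj'
        rw [pvE_pvApply s _ (m : Int) (pvWrites n (m : Int)) k j' (by omega) hiL hjs]
        have hex : (∃ j ∈ pvWrites n (m : Int), j.toNat = j') ↔ pvAdjB n (m : Int) (j' : Int) = true := by
          constructor
          · rintro ⟨j, hjmem, hjeq⟩
            obtain ⟨hj0, _, hadj⟩ := (pvWrites_char n (m : Int) j hn (by omega) hmlt).mp hjmem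
            have hje : (j' : Int) = j := by omega
            rwa [hje]
          · intro hadj
            refine ⟨(j' : Int), ?_, by simp⟩
            exact (pvWrites_char n (m : Int) (j' : Int) hn (by omega) hmlt).mpr
              ⟨by omega, by omega, hadj⟩
        rw [ihE k j' hk hj', Int.toNat_natCast]
        have hjal : pvAliveB s ((j' : Nat) : Int) = decide (pvGetA s ((j' : Nat) : Int) ≠ '0') :=
          pvAliveB_of_lt s _ (by omega) (by omega)
        by_cases hkm : k = m
        · subst hkm
          by_cases hadj : pvAdjB n (k : Int) (j' : Int) = true <;>
            simp [hex, halive, hadj, hjal]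
        · by_cases hlt : (k : Int) < (m : Int)
          · simp [hkm, hlt, show (k:Int) < (m:Int) + 1 by omega]
          · simp [hkm, hlt, show ¬ ((k:Int) < (m:Int) + 1) by omega]

-- ===== B-side lemmas =====

theorem pvReplicate_getD_false (m j'' : Nat) :
    (List.replicate m (false : Bool)).getD j'' false = false := by
  simp [List.getD_eq_getElem?_getD, List.getElem?_replicate]
  split <;> rfl

theorem pvRowB_not_alive (s : String) (n size i : Int) (h : pvAliveB s i = false) :
    pvRowB s n size i = List.replicate size.toNat false := by
  simp [pvRowB, h]

theorem pvBand (n i : Int) (hn : 1 ≤ n) (hi : 0 ≤ i) (hi2 : i < n * n) :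
    0 ≤ (max 0 (PySem.Int.floordiv i n - 1)) * n ∧
    (max 0 (PySem.Int.floordiv i n - 1)) * n ≤ (min n (PySem.Int.floordiv i n + 2)) * n ∧
    (min n (PySem.Int.floordiv i n + 2)) * n ≤ n * n := by
  have hnpos : (0 : Int) < n := by omega
  set q := PySem.Int.floordiv i n with hqdef
  have hq0 : 0 ≤ q := by
    rw [hqdef, PySem.Int.le_floordiv_iff_mul_le hnpos]; nlinarith
  have hqn : q < n := by
    rw [hqdef, PySem.Int.floordiv_lt_iff_lt_mul hnpos]; exact hi2
  have h1 : 0 ≤ max 0 (q - 1) := le_max_left 0 (q - 1)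
  have h2 : max 0 (q - 1) ≤ min n (q + 2) := by
    rcases max_cases 0 (q - 1) with ⟨he, _⟩ | ⟨he, _⟩ <;> rw [he] <;>
      rcases min_cases n (q + 2) with ⟨hf, _⟩ | ⟨hf, _⟩ <;> rw [hf] <;> omega
  have h3 : min n (q + 2) ≤ n := min_le_left n (q + 2)
  exact ⟨mul_nonneg h1 (by omega), by nlinarith, by nlinarith⟩

theorem pvAdjB_band (n i j : Int) (hn : 1 ≤ n) (_hi : 0 ≤ i) (_hi2 : i < n * n)
    (hj : 0 ≤ j) (hj2 : j < n * n) (hadj : pvAdjB n i j = true) :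
    (max 0 (PySem.Int.floordiv i n - 1)) * n ≤ j ∧ j < (min n (PySem.Int.floordiv i n + 2)) * n := by
  have hnpos : (0 : Int) < n := by omega
  set q := PySem.Int.floordiv i n with hqdef
  set qj := PySem.Int.floordiv j n with hqjdef
  set rj := PySem.Int.mod j n with hrjdef
  have hqrj : qj * n + rj = j := PySem.Int.floordiv_mul_add_mod j n
  have hrj0 : 0 ≤ rj := by rw [hrjdef, PySem.Int.mod_eq_emod_of_pos hnpos]; exact Int.emod_nonneg j (by omega)
  have hrjn : rj < n := by rw [hrjdef, PySem.Int.mod_eq_emod_of_pos hnpos]; exact Int.emod_lt_of_pos j hnpos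
  have hqj0 : 0 ≤ qj := by
    rw [hqjdef, PySem.Int.le_floordiv_iff_mul_le hnpos]; nlinarith
  have hqjn : qj < n := by
    rw [hqjdef, PySem.Int.floordiv_lt_iff_lt_mul hnpos]; exact hj2
  simp only [pvAdjB, ← hqdef, ← hqjdef, Bool.and_eq_true, decide_eq_true_eq, abs_le] at hadj
  obtain ⟨⟨_, hdq1, hdq2⟩, _⟩ := hadj
  have hlow : max 0 (q - 1) ≤ qj := by
    rcases max_cases 0 (q - 1) with ⟨he, _⟩ | ⟨he, _⟩ <;> rw [he] <;> omega
  have hhigh : qj + 1 ≤ min n (q + 2) := by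
    rcases min_cases n (q + 2) with ⟨he, _⟩ | ⟨he, _⟩ <;> rw [he] <;> omega
  constructor
  · nlinarith
  · nlinarith [mul_le_mul_of_nonneg_right hhigh (le_of_lt hnpos)]

theorem pvRowB_length (s : String) (n i : Int) (hn : 1 ≤ n) (hi : 0 ≤ i) (hi2 : i < n * n) :
    (pvRowB s n (n * n) i).length = (n * n).toNat := by
  obtain ⟨hb1, hb2, hb3⟩ := pvBand n i hn hi hi2
  unfold pvRowB
  split
  · simp only [List.length_append, List.length_replicate, List.length_map,
      PySem.List.length_pyRange_one]
    omega
  · simp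

theorem pvRowB_get (s : String) (n i : Int) (hn : 1 ≤ n) (hi : 0 ≤ i) (hi2 : i < n * n)
    (j' : Nat) (hj' : j' < (n * n).toNat) :
    (pvRowB s n (n * n) i).getD j' false =
      (pvAliveB s i && (pvAdjB n i (j' : Int) && pvAliveB s (j' : Int))) := by
  obtain ⟨hb1, hb2, hb3⟩ := pvBand n i hn hi hi2
  by_cases halive : pvAliveB s i = true
  · set lo := (max 0 (PySem.Int.floordiv i n - 1)) * n with hlo
    set hi' := (min n (PySem.Int.floordiv i n + 2)) * n with hhi
    have hrow : pvRowB s n (n * n) i =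
        List.replicate lo.toNat false
          ++ (PySem.List.pyRange lo hi' 1).map (fun j => pvAdjB n i j && pvAliveB s j)
          ++ List.replicate ((n * n) - hi').toNat false := by
      simp [pvRowB, halive, ← hlo, ← hhi]
    have hlen1 : (List.replicate lo.toNat (false : Bool)).length = lo.toNat := by simp
    have hlen2 : ((PySem.List.pyRange lo hi' 1).map (fun j => pvAdjB n i j && pvAliveB s j)).length
        = (hi' - lo).toNat := by
      simp [PySem.List.length_pyRange_one]
    rw [hrow, halive, Bool.true_and]
    by_cases hc1 : j' < lo.toNat
    · -- before the band: stored False; predicate is False there too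
      have hadj : pvAdjB n i (j' : Int) = false := by
        by_contra hne
        have ht : pvAdjB n i (j' : Int) = true := by simpa using hne
        obtain ⟨hge, _⟩ := pvAdjB_band n i (j' : Int) hn hi hi2 (by omega) (by omega) ht
        omega
      rw [List.append_assoc, List.getD_append _ _ _ _ (by omega), pvReplicate_getD_false, hadj]
      simp
    · by_cases hc2 : j' < lo.toNat + (hi' - lo).toNat
      · -- inside the band: the mapped predicate entry
        have hlt : j' - lo.toNat < (hi' - lo).toNat := by omega
        have hj'' : j' - (List.replicate lo.toNat (false : Bool)).length
            < ((PySem.List.pyRange lo hi' 1).map (fun j => pvAdjB n i j && pvAliveB s j)).length := by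
          rw [hlen1, hlen2]; exact hlt
        rw [List.append_assoc, List.getD_append_right _ _ _ _ (by omega),
          List.getD_append _ _ _ _ (by rw [hlen1]; rw [hlen1] at hj''; exact hj''),
          List.getD_eq_getElem _ _ (by rw [hlen1]; rw [hlen1] at hj''; exact hj''), List.getElem_map]
        have hidx : (PySem.List.pyRange lo hi' 1)[j' - (List.replicate lo.toNat (false:Bool)).length]'(by
            simpa [PySem.List.length_pyRange_one, hlen1] using hlt) = (j' : Int) := by
          rw [PySem.List.getElem_pyRange_one]
          simp only [hlen1]
          omega
        rw [hidx]
      · -- after the band: stored False; predicate is False there too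
        have hadj : pvAdjB n i (j' : Int) = false := by
          by_contra hne
          have ht : pvAdjB n i (j' : Int) = true := by simpa using hne
          obtain ⟨_, hltband⟩ := pvAdjB_band n i (j' : Int) hn hi hi2 (by omega) (by omega) ht
          omega
        rw [List.append_assoc, List.getD_append_right _ _ _ _ (by omega)]
        have : (List.replicate lo.toNat (false : Bool)).length = lo.toNat := hlen1
        rw [List.getD_append_right _ _ _ _ (by rw [hlen1, hlen2]; omega),
          pvReplicate_getD_false, hadj]
        simp
  · have hf : pvAliveB s i = false := by simpa using halive
    rw [pvRowB_not_alive s n (n * n) i hf, pvReplicate_getD_false, hf]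
    simp

-- ===== VERDICT (by name: the statement is the Claim_ definition above) =====
theorem buildConnection_spec : Claim_equal_buildConnection := by
  unfold Claim_equal_buildConnection
  intro s n _hdom hpre
  unfold Spec_buildConnection
  have halt : buildConnection_alt s n = (PySem.List.pyRange 0 (n*n) 1).map (pvRowB s n (n*n)) := by
    unfold buildConnection_alt
    rw [PySem.List.foldl_append_singleton_eq_map]
    simp
  rcases hpre with ⟨hlen, hn0⟩ | hall
  · by_cases hn : n = 0
    · subst hn
      have hsl : s.toList.length = 0 := by omega
      unfold buildConnection
      rw [halt, PySem.Str.len_eq, hsl]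
      simp [PySem.List.pyRange_one_eq_nil (le_refl (0:Int))]
    · have hn1 : 1 ≤ n := by omega
      have hnn : 0 ≤ n * n := by nlinarith
      have hsz : (((n*n).toNat : Int)) = n * n := Int.toNat_of_nonneg hnn
      obtain ⟨hL, hRow, hE⟩ := pvFold_inv s n hn1 hlen (n*n).toNat (by omega)
      have hsl : ((s.toList.length : Nat) : Int) = (((n*n).toNat : Nat) : Int) := by
        rw [hsz]; exact hlen
      have hbc : buildConnection s n = (PySem.List.pyRange 0 (((n*n).toNat : Nat) : Int) 1).foldl
          (pvStepA s n) (List.replicate (n*n).toNat (List.replicate (n*n).toNat false)) := by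
        unfold buildConnection
        rw [pow_two, PySem.Str.len_eq, hsl]
      rw [hbc, halt]
      apply List.ext_getElem
      · rw [hL]
        simp [PySem.List.length_pyRange_one]
      · intro k hk1 hk2
        have hk' : k < (n*n).toNat := by rw [hL] at hk1; exact hk1
        have hrhs : ((PySem.List.pyRange 0 (n*n) 1).map (pvRowB s n (n*n)))[k]
            = pvRowB s n (n*n) (k : Int) := by
          simp [List.getElem_map, PySem.List.getElem_pyRange_one]
        have hrl : ((PySem.List.pyRange 0 (((n*n).toNat : Nat) : Int) 1).foldl
            (pvStepA s n) (List.replicate (n*n).toNat (List.replicate (n*n).toNat false)))[k].length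
            = (n*n).toNat := by
          rw [← List.getD_eq_getElem _ [] hk1]
          exact hRow k hk'
        apply List.ext_getElem
        · rw [hrl, hrhs, pvRowB_length s n (k : Int) hn1 (by omega) (by omega)]
        · intro j' hj1 hj2
          have hj' : j' < (n*n).toNat := by rw [hrl] at hj1; exact hj1
          have hpv : ((PySem.List.pyRange 0 (((n*n).toNat : Nat) : Int) 1).foldl
              (pvStepA s n) (List.replicate (n*n).toNat (List.replicate (n*n).toNat false)))[k][j']
              = pvE ((PySem.List.pyRange 0 (((n*n).toNat : Nat) : Int) 1).foldl
              (pvStepA s n) (List.replicate (n*n).toNat (List.replicate (n*n).toNat false))) k j' := by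
            unfold pvE
            rw [List.getD_eq_getElem _ [] hk1, List.getD_eq_getElem _ false hj1]
          have hrhs2 : ((PySem.List.pyRange 0 (n*n) 1).map (pvRowB s n (n*n)))[k][j']
              = (pvRowB s n (n*n) (k : Int)).getD j' false := by
            rw [← List.getD_eq_getElem _ false hj2, hrhs]
          rw [hpv, hE k j' hk' hj',
            if_pos (show (k : Int) < (((n*n).toNat : Nat) : Int) by exact_mod_cast hk'),
            hrhs2, pvRowB_get s n (k : Int) hn1 (by omega) (by omega) j' hj']
  · -- no live cell: A's loop body always hits 'continue', B's rows are all [False]*size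
    have hget : ∀ t : Int, pvGetA s t = '0' := by
      intro t
      unfold pvGetA
      cases hgg : PySem.Str.pyGet? s t with
      | none => rfl
      | some c =>
        have hc : c ∈ s.toList := PySem.List.mem_of_pyGet?_eq_some s.toList hgg
        simp [hall c hc]
    have halive : ∀ t : Int, pvAliveB s t = false := fun t => pvAliveB_false s t (hget t)
    have hfold : ∀ (l : List Int) (c : List (List Bool)), l.foldl (pvStepA s n) c = c := by
      intro l
      induction l with
      | nil => intro c; rfl
      | cons x xs ih =>
        intro c
        rw [List.foldl_cons, pvStepA_eq, if_pos (hget x)]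
        exact ih c
    unfold buildConnection
    rw [hfold, halt]
    apply List.ext_getElem
    · simp [PySem.List.length_pyRange_one, pow_two]
    · intro k hk1 hk2
      rw [List.getElem_replicate, List.getElem_map,
        pvRowB_not_alive s n (n*n) _ (halive _)]
      simp [pow_two]
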